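-- pv_equiv track=rewrite | github.com/miliar/Code_Jam_Webscraper | Solutions_python/Problem_201/1851.py | findFree
-- ===== SOURCE A (Python) =====
-- class Free:
--     def __init__(self, left, right):
--         self.left = left
--         self.right = right
--
-- def findFree(N,people):
--     x = 'x'
--     stalls = [x] + [None for i in range(N)] + [x]
--
--
--     while people:
--         MAX = 0
--
--         free = None
--
--         counted = False
--         counter = 0
--         for i in range(len(stalls)):
--             if stalls[i] is None:
--                 counter += 1
--                 if not counted:
--                     counted = True
--                     left = i - 1 #left index
--
--             else:
--                 if counted:
--                     counted = False
--                     right = i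
--                     if (right - left) > MAX:
--                         MAX = right - left
--                         free = Free(left,right)
--                 counter = 0
--                 left = 0
--                 right = 0
--         #INSERT PERSON
--         stalls[(free.left + free.right)//2] = x
--
--         if people == 1:
--             return free.left,free.right
--         people -= 1
--         free = None
--         MAX = 0
-- ===== SOURCE B (Python) =====
-- def findFree(N, people):
--     # Simulate on a list of free gaps (left, right) instead of an array of stalls:
--     # each step pick the leftmost largest gap and split it at its midpoint.
--     gaps = [(0, N + 1)] if N >= 1 else []
--     while True:
--         best = gaps[0]
--         for g in gaps[1:]:
--             if g[1] - g[0] > best[1] - best[0]: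
--                 best = g
--         if people == 1:
--             return best
--         m = (best[0] + best[1]) // 2
--         gaps = _split(gaps, m)
--         people -= 1
--
-- def _split(gaps, m):
--     out = []
--     for (l, r) in gaps:
--         if l < m < r:
--             if m - l >= 2:
--                 out.append((l, m))
--             if r - m >= 2:
--                 out.append((m, r))
--         else:
--             out.append((l, r))
--     return out
-- ===== Notes on version B (the rewrite author's own statement) =====
-- stated objective: alternative
-- what changed: B drops the length-(N+2) stall array entirely and simulates on the list of free gaps (left,right) themselves, picking the leftmost largest gap and splitting it at its midpoint, so each step scans the current gaps (at most the number of people placed) instead of rescanning all N+2 stalls.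
-- outside the precondition, e.g. on findFree(5, 0): A returns None, B raises IndexError
import Mathlib
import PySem

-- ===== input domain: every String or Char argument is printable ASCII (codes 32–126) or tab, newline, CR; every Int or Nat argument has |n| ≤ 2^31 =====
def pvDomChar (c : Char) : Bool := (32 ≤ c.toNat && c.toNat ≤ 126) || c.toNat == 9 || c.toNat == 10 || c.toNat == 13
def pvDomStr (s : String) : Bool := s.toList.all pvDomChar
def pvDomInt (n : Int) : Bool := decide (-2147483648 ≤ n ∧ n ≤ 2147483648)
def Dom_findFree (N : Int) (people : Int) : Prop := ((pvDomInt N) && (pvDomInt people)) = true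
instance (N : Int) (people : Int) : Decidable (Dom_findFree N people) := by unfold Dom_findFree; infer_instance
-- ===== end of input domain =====

-- B replaces A's per-person rescan of the whole (N+2)-cell stall array by a simulation on the
-- list of free gaps (left,right) themselves (pick leftmost largest, split at midpoint);
-- return values are proved identical on Pre_ (1 <= people <= N, where A returns an int pair).

-- ===== PORT A =====
-- scan state: MAX, free, counted, counter, left, right (Free object becomes a pair)
structure StA where
  MAX : Int
  free : Option (Int × Int)
  counted : Bool
  counter : Int
  left : Int
  right : Int

-- the inner `for i in range(len(stalls))` loop, carrying the index i
def scanA : List (Option String) → Int → StA → StA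
  | [], _, s => s
  | c :: t, i, s =>
    match c with
    | none =>
      let s1 := { s with counter := s.counter + 1 }
      let s2 := if !s1.counted then { s1 with counted := true, left := i - 1 } else s1
      scanA t (i + 1) s2
    | some _ =>
      let s1 :=
        if s.counted then
          let s' := { s with counted := false, right := i }
          if s'.right - s'.left > s'.MAX then
            { s' with MAX := s'.right - s'.left, free := some (s'.left, s'.right) }
          else s'
        else s
      scanA t (i + 1) { s1 with counter := 0, left := 0, right := 0 }

-- the `while people:` loop; fuel = people.toNat (the loop runs people iterations when 1 ≤ people).
-- In every reachable state the written index (l+r)//2 is ≥ 1, so `.toNat` agrees with Python here;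
-- `free is None` (Python: AttributeError) and exhausted fuel (people ≤ 0) are outside Pre_.
def loopA (stalls : List (Option String)) (people : Int) : Nat → Int × Int
  | 0 => (0, 0)
  | fuel + 1 =>
    let s := scanA stalls 0 ⟨0, none, false, 0, 0, 0⟩
    match s.free with
    | none => (0, 0)
    | some (l, r) =>
      let stalls' := stalls.set (PySem.Int.floordiv (l + r) 2).toNat (some "x")
      if people == 1 then (l, r)
      else loopA stalls' (people - 1) fuel

def findFree (N : Int) (people : Int) : Int × Int :=
  loopA ([some "x"] ++ List.replicate N.toNat none ++ [some "x"]) people people.toNat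

-- ===== PORT B =====
-- _split(gaps, m): rebuild the gap list, splitting any gap strictly containing m
def splitB : List (Int × Int) → Int → List (Int × Int)
  | [], _ => []
  | (l, r) :: t, m =>
    if l < m ∧ m < r then
      ((if 2 ≤ m - l then [(l, m)] else []) ++ (if 2 ≤ r - m then [(m, r)] else [])) ++ splitB t m
    else (l, r) :: splitB t m

-- the `while True:` loop; fuel = people.toNat (returns at people == 1).
-- `gaps[0]` on an empty list (Python: IndexError) and exhausted fuel are outside Pre_.
def loopB (gaps : List (Int × Int)) (people : Int) : Nat → Int × Int
  | 0 => (0, 0)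
  | fuel + 1 =>
    match gaps with
    | [] => (0, 0)
    | g0 :: rest =>
      let best := rest.foldl (fun b g => if g.2 - g.1 > b.2 - b.1 then g else b) g0
      if people == 1 then best
      else loopB (splitB gaps (PySem.Int.floordiv (best.1 + best.2) 2)) (people - 1) fuel

def findFree_alt (N : Int) (people : Int) : Int × Int :=
  loopB (if 1 ≤ N then [(0, N + 1)] else []) people people.toNat

-- ===== PRECONDITION & SPEC =====
-- Pre_ excludes people = 0 (A returns None, not an int pair) and the inputs where A raises
-- AttributeError (people < 0, or more people than free stalls: N < people); on 1 ≤ people ≤ N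
-- A always returns an int pair.
def Pre_findFree (N : Int) (people : Int) : Prop := 1 ≤ people ∧ people ≤ N
instance (N : Int) (people : Int) : Decidable (Pre_findFree N people) := by unfold Pre_findFree; infer_instance

def pvWitness_findFree : Int × Int := (4, 3)

def Spec_findFree (N : Int) (people : Int) (out : Int × Int) : Prop := out = findFree_alt N people
instance (N : Int) (people : Int) (out : Int × Int) : Decidable (Spec_findFree N people out) := by unfold Spec_findFree; infer_instance

-- ===== CLAIM (what is proved, stated in full; the proofs are below) =====
def Claim_equal_findFree : Prop := ∀ (N : Int) (people : Int), Dom_findFree N people → Pre_findFree N people → Spec_findFree N people (findFree N people)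

-- ===== LEMMAS AND PROOFS =====

-- the gap decomposition of a stall list: maximal runs of free cells as (left, right) boundary pairs,
-- scanned from index i with st = the pending run's left boundary (an unclosed final run is dropped,
-- exactly as in A's scan)
def gapsAux : List (Option String) → Int → Option Int → List (Int × Int)
  | [], _, _ => []
  | none :: t, i, none => gapsAux t (i + 1) (some (i - 1))
  | none :: t, i, some l => gapsAux t (i + 1) (some l)
  | some _ :: t, i, some l => (l, i) :: gapsAux t (i + 1) none
  | some _ :: t, i, none => gapsAux t (i + 1) none

-- running (MAX, free) update of A's scan, one gap at a time
def bestOf (p : Int × Option (Int × Int)) (g : Int × Int) : Int × Option (Int × Int) :=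
  if g.2 - g.1 > p.1 then (g.2 - g.1, some g) else p

-- B's pick step
def pickf (b g : Int × Int) : Int × Int := if g.2 - g.1 > b.2 - b.1 then g else b

-- number of leading free cells
def nlead : List (Option String) → Nat
  | [] => 0
  | none :: t => nlead t + 1
  | some _ :: _ => 0

lemma scanA_free : ∀ (S : List (Option String)) (i : Int) (s : StA),
    ((scanA S i s).MAX, (scanA S i s).free)
      = List.foldl bestOf (s.MAX, s.free) (gapsAux S i (if s.counted then some s.left else none)) := by
  intro S
  induction S with
  | nil => intro i s; rfl
  | cons c t ih =>
    intro i s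
    match c with
    | none =>
      cases hc : s.counted
      · simp only [scanA, hc, Bool.not_false, if_true]
        rw [ih]
        simp [gapsAux]
      · simp only [scanA, hc, Bool.not_true]
        rw [ih]
        simp [gapsAux]
    | some v =>
      cases hc : s.counted
      · simp only [scanA, hc]
        rw [ih]
        simp [gapsAux, hc]
      · simp only [scanA, hc, if_true]
        split_ifs with hgt
        · rw [ih]
          simp [gapsAux, List.foldl_cons, bestOf, hgt]
        · rw [ih]
          simp [gapsAux, List.foldl_cons, bestOf, hgt]

lemma foldl_bestOf_some : ∀ (rest : List (Int × Int)) (b : Int × Int),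
    List.foldl bestOf (b.2 - b.1, some b) rest
      = ((List.foldl pickf b rest).2 - (List.foldl pickf b rest).1, some (List.foldl pickf b rest)) := by
  intro rest
  induction rest with
  | nil => intro b; rfl
  | cons g t ih =>
    intro b
    simp only [List.foldl_cons, bestOf, pickf]
    split_ifs with h
    · exact ih g
    · exact ih b

lemma foldl_pickf_mem : ∀ (rest : List (Int × Int)) (b : Int × Int),
    List.foldl pickf b rest ∈ b :: rest := by
  intro rest
  induction rest with
  | nil => intro b; simp
  | cons g t ih =>
    intro b
    simp only [List.foldl_cons]
    have := ih (pickf b g)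
    have hbg : pickf b g = g ∨ pickf b g = b := by
      unfold pickf; split_ifs <;> simp
    rcases List.mem_cons.mp this with h | h
    · rcases hbg with hg | hg <;> rw [h, hg] <;> simp
    · simp [h]

lemma gap_size : ∀ (S : List (Option String)) (i : Int) (st : Option Int),
    (∀ l, st = some l → l + 2 ≤ i) → ∀ g ∈ gapsAux S i st, 2 ≤ g.2 - g.1 := by
  intro S
  induction S with
  | nil => intro i st h g hg; simp [gapsAux] at hg
  | cons c t ih =>
    intro i st h g hg
    match c, st with
    | none, none =>
      exact ih (i+1) (some (i-1)) (by intro l hl; cases hl; omega) g hg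
    | none, some l =>
      exact ih (i+1) (some l) (by intro l' hl'; cases hl'; have := h l rfl; omega) g hg
    | some v, some l =>
      rw [gapsAux] at hg
      rcases List.mem_cons.mp hg with h1 | h1
      · subst h1; have := h l rfl; simp; omega
      · exact ih (i+1) none (by intro l' hl'; cases hl') g h1
    | some v, none =>
      exact ih (i+1) none (by intro l' hl'; cases hl') g hg

lemma gap_lb : ∀ (S : List (Option String)) (i : Int) (st : Option Int) (g : Int × Int),
    g ∈ gapsAux S i st → (∃ l, st = some l ∧ g.1 = l) ∨ i - 1 ≤ g.1 := by
  intro S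
  induction S with
  | nil => intro i st g hg; simp [gapsAux] at hg
  | cons c t ih =>
    intro i st g hg
    match c, st with
    | none, none =>
      rcases ih (i+1) (some (i-1)) g hg with ⟨l, hl, h1⟩ | h1
      · cases hl; right; omega
      · right; omega
    | none, some l =>
      rcases ih (i+1) (some l) g hg with ⟨l', hl', h1⟩ | h1
      · cases hl'; left; exact ⟨l, rfl, h1⟩
      · right; omega
    | some v, some l =>
      rw [gapsAux] at hg
      rcases List.mem_cons.mp hg with h1 | h1
      · subst h1; left; exact ⟨l, rfl, rfl⟩
      · rcases ih (i+1) none g h1 with ⟨l', hl', _⟩ | h1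
        · cases hl'
        · right; omega
    | some v, none =>
      rcases ih (i+1) none g hg with ⟨l', hl', _⟩ | h1
      · cases hl'
      · right; omega

lemma gap_ub : ∀ (S : List (Option String)) (i : Int) (st : Option Int) (g : Int × Int),
    g ∈ gapsAux S i st → g.2 < i + S.length := by
  intro S
  induction S with
  | nil => intro i st g hg; simp [gapsAux] at hg
  | cons c t ih =>
    intro i st g hg
    match c, st with
    | none, none => have := ih (i+1) (some (i-1)) g hg; simp at *; omega
    | none, some l => have := ih (i+1) (some l) g hg; simp at *; omega
    | some v, some l =>
      rw [gapsAux] at hg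
      rcases List.mem_cons.mp hg with h1 | h1
      · subst h1; simp
      · have := ih (i+1) none g h1; simp at *; omega
    | some v, none => have := ih (i+1) none g hg; simp at *; omega

lemma gap_cell_none : ∀ (S : List (Option String)) (i : Int) (st : Option Int) (g : Int × Int),
    g ∈ gapsAux S i st → ∀ m : Int, g.1 < m → m < g.2 → i ≤ m → S[(m - i).toNat]? = some none := by
  intro S
  induction S with
  | nil => intro i st g hg; simp [gapsAux] at hg
  | cons c t ih =>
    intro i st g hg m h1 h2 h3
    match c, st with
    | none, none =>
      rcases eq_or_lt_of_le h3 with he | hlt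
      · rw [← he]; simp
      · have h4 := ih (i+1) (some (i-1)) g hg m h1 h2 (by omega)
        have hk : (m - i).toNat = (m - (i+1)).toNat + 1 := by omega
        rw [hk, List.getElem?_cons_succ]; exact h4
    | none, some l =>
      rcases eq_or_lt_of_le h3 with he | hlt
      · rw [← he]; simp
      · have h4 := ih (i+1) (some l) g hg m h1 h2 (by omega)
        have hk : (m - i).toNat = (m - (i+1)).toNat + 1 := by omega
        rw [hk, List.getElem?_cons_succ]; exact h4
    | some v, some l =>
      rw [gapsAux] at hg
      rcases List.mem_cons.mp hg with hh | hh
      · rw [hh] at h2; simp at h2; omega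
      · have hlb : i ≤ g.1 := by
          rcases gap_lb t (i+1) none g hh with ⟨l', hl', _⟩ | hb
          · cases hl'
          · omega
        have h4 := ih (i+1) none g hh m h1 h2 (by omega)
        have hk : (m - i).toNat = (m - (i+1)).toNat + 1 := by omega
        rw [hk, List.getElem?_cons_succ]; exact h4
    | some v, none =>
      have hlb : i ≤ g.1 := by
        rcases gap_lb t (i+1) none g hg with ⟨l', hl', _⟩ | hb
        · cases hl'
        · omega
      have h4 := ih (i+1) none g hg m h1 h2 (by omega)
      have hk : (m - i).toNat = (m - (i+1)).toNat + 1 := by omega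
      rw [hk, List.getElem?_cons_succ]; exact h4

lemma nlead_replicate (n : Nat) : nlead (List.replicate n none) = n := by
  induction n with
  | zero => rfl
  | succ k ih => rw [List.replicate_succ, nlead, ih]

lemma gapsAux_close : ∀ (T : List (Option String)) (j l : Int),
    gapsAux (T ++ [some "x"]) j (some l)
      = (l, j + nlead T) :: gapsAux (List.drop (nlead T) T ++ [some "x"]) (j + nlead T) none := by
  intro T
  induction T with
  | nil => intro j l; simp [gapsAux, nlead]
  | cons c t ih =>
    intro j l
    match c with
    | none =>
      rw [List.cons_append, gapsAux, ih (j+1) l]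
      simp only [nlead, List.drop_succ_cons]
      have h1 : j + ((nlead t + 1 : Nat) : Int) = (j + 1) + (nlead t : Int) := by push_cast; ring
      rw [h1]
    | some v =>
      simp only [nlead, List.cons_append, gapsAux, Nat.cast_zero, add_zero, List.drop_zero]

lemma gapsAux_open : ∀ (T : List (Option String)) (j : Int), T.head? = some none →
    gapsAux (T ++ [some "x"]) j none
      = (j - 1, j + nlead T) :: gapsAux (List.drop (nlead T) T ++ [some "x"]) (j + nlead T) none := by
  intro T
  match T with
  | [] => intro j h; simp at h
  | some v :: t => intro j h; simp at h
  | none :: t =>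
    intro j _
    rw [List.cons_append, gapsAux, gapsAux_close t (j+1) (j-1)]
    simp only [nlead, List.drop_succ_cons]
    have h1 : j + ((nlead t + 1 : Nat) : Int) = (j + 1) + (nlead t : Int) := by push_cast; ring
    rw [h1]

lemma splitB_of_le : ∀ (G : List (Int × Int)) (m : Int),
    (∀ g ∈ G, ¬(g.1 < m ∧ m < g.2)) → splitB G m = G := by
  intro G
  induction G with
  | nil => intro m h; rfl
  | cons g t ih =>
    intro m h
    obtain ⟨l, r⟩ := g
    rw [splitB, if_neg (h (l, r) (by simp)), ih m (by intro g' hg'; exact h g' (by simp [hg']))]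

lemma gapsAux_set : ∀ (T : List (Option String)) (k : Nat) (i : Int) (st : Option Int),
    (∀ l, st = some l → l + 2 ≤ i) → T[k]? = some none →
    gapsAux ((T.set k (some "x")) ++ [some "x"]) i st
      = splitB (gapsAux (T ++ [some "x"]) i st) (i + k) := by
  intro T
  induction T with
  | nil => intro k i st hinv hk; simp at hk
  | cons c t ih =>
    intro k i st hinv hk
    match k with
    | 0 =>
      have hc : c = none := by simpa using hk
      subst hc
      have hZ : ∀ g ∈ gapsAux (List.drop (nlead t) t ++ [some "x"]) ((i+1) + (nlead t : Int)) none,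
          ¬(g.1 < i ∧ i < g.2) := by
        intro g hg
        rcases gap_lb _ _ _ _ hg with ⟨l', hl', _⟩ | hb
        · cases hl'
        · intro hcon; omega
      match st with
      | none =>
        simp only [List.set_cons_zero, List.cons_append, gapsAux, Nat.cast_zero, add_zero]
        rw [gapsAux_close t (i+1) (i-1), splitB,
          if_pos (by constructor <;> omega : (i-1) < i ∧ i < (i+1) + (nlead t : Int)),
          splitB_of_le _ _ hZ]
        rcases Nat.eq_zero_or_pos (nlead t) with h0 | h0
        · rw [if_neg (by omega), if_neg (by omega)]
          simp [h0]
        · have hhead : t.head? = some none := by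
            match t with
            | [] => simp [nlead] at h0
            | some v :: t' => simp [nlead] at h0
            | none :: t' => rfl
          rw [gapsAux_open t (i+1) hhead, if_neg (by omega), if_pos (by omega)]
          simp
      | some l =>
        have hl2 : l + 2 ≤ i := hinv l rfl
        simp only [List.set_cons_zero, List.cons_append, gapsAux, Nat.cast_zero, add_zero]
        rw [gapsAux_close t (i+1) l, splitB,
          if_pos (by constructor <;> omega : l < i ∧ i < (i+1) + (nlead t : Int)),
          splitB_of_le _ _ hZ, if_pos (by omega)]
        rcases Nat.eq_zero_or_pos (nlead t) with h0 | h0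
        · rw [if_neg (by omega)]
          simp [h0]
        · have hhead : t.head? = some none := by
            match t with
            | [] => simp [nlead] at h0
            | some v :: t' => simp [nlead] at h0
            | none :: t' => rfl
          rw [gapsAux_open t (i+1) hhead, if_pos (by omega)]
          simp
    | k' + 1 =>
      have hk' : t[k']? = some none := by simpa using hk
      have hm : i + ((k' + 1 : Nat) : Int) = (i + 1) + (k' : Int) := by push_cast; ring
      match c, st with
      | none, none =>
        simp only [List.set_cons_succ, List.cons_append, gapsAux]
        rw [hm, ih k' (i+1) (some (i-1)) (by intro l hl; cases hl; omega) hk']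
      | none, some l =>
        have hl2 : l + 2 ≤ i := hinv l rfl
        simp only [List.set_cons_succ, List.cons_append, gapsAux]
        rw [hm, ih k' (i+1) (some l) (by intro l' hl'; cases hl'; omega) hk']
      | some v, none =>
        simp only [List.set_cons_succ, List.cons_append, gapsAux]
        rw [hm, ih k' (i+1) none (by intro l' hl'; cases hl') hk']
      | some v, some l =>
        simp only [List.set_cons_succ, List.cons_append, gapsAux]
        rw [splitB, if_neg (by intro hcon; omega : ¬((l : Int) < i + ((k' + 1 : Nat) : Int) ∧ i + ((k' + 1 : Nat) : Int) < i))]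
        rw [hm, ih k' (i+1) none (by intro l' hl'; cases hl') hk']

lemma gaps_init (n : Nat) :
    gapsAux (some "x" :: (List.replicate n none ++ [some "x"])) 0 none
      = if n = 0 then [] else [(0, (n : Int) + 1)] := by
  rw [gapsAux]
  norm_num
  rcases Nat.eq_zero_or_pos n with h | h
  · subst h; simp [gapsAux]
  · rw [gapsAux_open (List.replicate n none) 1
      (by cases n with | zero => omega | succ k => simp [List.replicate_succ])]
    rw [nlead_replicate, List.drop_replicate]
    have hn : n ≠ 0 := by omega
    simp [gapsAux, hn]
    omega

lemma loop_eq : ∀ (fuel : Nat) (T : List (Option String)) (people : Int),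
    loopA (some "x" :: (T ++ [some "x"])) people fuel
      = loopB (gapsAux (some "x" :: (T ++ [some "x"])) 0 none) people fuel := by
  intro fuel
  induction fuel with
  | zero => intro T people; rfl
  | succ f ih =>
    intro T people
    have hstep : ∀ L : List (Option String), gapsAux (some "x" :: L) 0 none = gapsAux L 1 none := by
      intro L; rw [gapsAux]; norm_num
    have hscan :
        ((scanA (some "x" :: (T ++ [some "x"])) 0 ⟨0, none, false, 0, 0, 0⟩).MAX,
         (scanA (some "x" :: (T ++ [some "x"])) 0 ⟨0, none, false, 0, 0, 0⟩).free)
        = List.foldl bestOf (0, none) (gapsAux (T ++ [some "x"]) 1 none) := by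
      have h := scanA_free (some "x" :: (T ++ [some "x"])) 0 ⟨0, none, false, 0, 0, 0⟩
      simpa [hstep] using h
    cases hGm : gapsAux (T ++ [some "x"]) 1 none with
    | nil =>
      rw [hGm] at hscan
      have hfree : (scanA (some "x" :: (T ++ [some "x"])) 0 ⟨0, none, false, 0, 0, 0⟩).free = none := by
        have h2 := congrArg Prod.snd hscan; simpa using h2
      rw [hstep, hGm]
      simp only [loopA, loopB, hfree]
    | cons g0 rest =>
      have hsz : ∀ g ∈ gapsAux (T ++ [some "x"]) 1 none, 2 ≤ g.2 - g.1 :=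
        gap_size _ 1 none (by intro l hl; cases hl)
      have hg02 : 2 ≤ g0.2 - g0.1 := hsz g0 (by rw [hGm]; simp)
      have hmemc := foldl_pickf_mem rest g0
      generalize hbest : List.foldl pickf g0 rest = best at hmemc
      obtain ⟨bl, br⟩ := best
      have hmem : (bl, br) ∈ gapsAux (T ++ [some "x"]) 1 none := by
        rw [hGm]; exact hmemc
      have hb2 : 2 ≤ br - bl := by have := hsz (bl, br) hmem; simpa using this
      have hfree : (scanA (some "x" :: (T ++ [some "x"])) 0 ⟨0, none, false, 0, 0, 0⟩).free
          = some (bl, br) := by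
        rw [hGm, List.foldl_cons] at hscan
        have hb0 : bestOf (0, none) g0 = (g0.2 - g0.1, some g0) := by
          unfold bestOf; rw [if_pos (by omega)]
        rw [hb0, foldl_bestOf_some, hbest] at hscan
        have h2 := congrArg Prod.snd hscan; simpa using h2
      have hlb : 0 ≤ bl := by
        rcases gap_lb _ 1 none (bl, br) hmem with ⟨l', hl', h1⟩ | h1
        · cases hl'
        · simp at h1; omega
      have hub : (br : Int) < 1 + ((T ++ [some "x"]).length : Int) := by
        have := gap_ub _ 1 none (bl, br) hmem; simpa using this
      have hub' : br < (T.length : Int) + 2 := by simp at hub; omega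
      obtain ⟨m, hm⟩ : ∃ m, PySem.Int.floordiv (bl + br) 2 = m := ⟨_, rfl⟩
      have hediv : m = (bl + br) / 2 := by
        rw [← hm]; exact PySem.Int.floordiv_eq_ediv_of_pos (by norm_num)
      have hm1 : 1 ≤ m ∧ bl < m ∧ m < br ∧ m ≤ (T.length : Int) := by rw [hediv]; omega
      have hcell := gap_cell_none (T ++ [some "x"]) 1 none (bl, br) hmem m
        (by simpa using hm1.2.1) (by simpa using hm1.2.2.1) (by omega)
      have hlt : (m - 1).toNat < T.length := by omega
      have hTk : T[(m - 1).toNat]? = some none := by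
        rwa [List.getElem?_append, if_pos hlt] at hcell
      have hset : (some "x" :: (T ++ [some "x"])).set m.toNat (some "x")
          = some "x" :: (T.set (m - 1).toNat (some "x") ++ [some "x"]) := by
        have h3 : m.toNat = (m - 1).toNat + 1 := by omega
        rw [h3, List.set_cons_succ, List.set_append_left _ _ hlt]
      have hsplit : gapsAux (T.set (m - 1).toNat (some "x") ++ [some "x"]) 1 none
          = splitB (gapsAux (T ++ [some "x"]) 1 none) m := by
        rw [gapsAux_set T ((m - 1).toNat) 1 none (by intro l hl; cases hl) hTk]
        congr 1
        omega
      have hlam : (fun (b g : Int × Int) => if g.2 - g.1 > b.2 - b.1 then g else b) = pickf := rfl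
      rw [hstep, hGm]
      simp only [loopA, loopB, hfree, hlam, hbest]
      by_cases hp : people == 1
      · simp [hp]
      · simp only [hp, Bool.false_eq_true, if_false]
        rw [hm, hset, ih, hstep, hsplit, hGm]

-- ===== VERDICT (by name: the statement is the Claim_ definition above) =====
theorem findFree_spec : Claim_equal_findFree := by
  intro N people _ _
  unfold Spec_findFree findFree findFree_alt
  have h1 : [some "x"] ++ List.replicate N.toNat (none : Option String) ++ [some "x"]
      = some "x" :: (List.replicate N.toNat none ++ [some "x"]) := by simp
  rw [h1, loop_eq, gaps_init]
  by_cases hN : 1 ≤ N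
  · have : N.toNat ≠ 0 := by omega
    simp only [this, if_pos hN]
    have h2 : ((N.toNat : Int)) = N := by omega
    simp [h2]
  · have : N.toNat = 0 := by omega
    simp [this, hN]
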